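-- pv_equiv track=rewrite | github.com/dd9098/XAI-CyberSec | KairosCadetsE3/new_embedding.py | path2higlist
-- ===== SOURCE A (Python) =====
-- def path2higlist(p):
--     l = []
--     try:
--         spl = p.strip().split('/')
--         for i in spl:
--             if len(l) != 0:
--                 l.append(l[-1] + '/' + i)
--             else:
--                 l.append(i)
--         return l
--     except Exception as e:
--         logger.error(f"Error in path2higlist with input '{p}': {e}")
--         return []
-- ===== SOURCE B (Python) =====
-- def path2higlist(p):
--     try:
--         spl = p.strip().split('/')
--         return ['/'.join(spl[:i+1]) for i in range(len(spl))]
--     except Exception as e: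
--         logger.error(f"Error in path2higlist with input '{p}': {e}")
--         return []
-- ===== Notes on version B (the rewrite author's own statement) =====
-- stated objective: simpler
-- what changed: Replaces the running-accumulator loop that extends the previous output element with a comprehension that recomputes each cumulative prefix independently as the separator-join of a token-prefix slice.
import Mathlib
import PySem

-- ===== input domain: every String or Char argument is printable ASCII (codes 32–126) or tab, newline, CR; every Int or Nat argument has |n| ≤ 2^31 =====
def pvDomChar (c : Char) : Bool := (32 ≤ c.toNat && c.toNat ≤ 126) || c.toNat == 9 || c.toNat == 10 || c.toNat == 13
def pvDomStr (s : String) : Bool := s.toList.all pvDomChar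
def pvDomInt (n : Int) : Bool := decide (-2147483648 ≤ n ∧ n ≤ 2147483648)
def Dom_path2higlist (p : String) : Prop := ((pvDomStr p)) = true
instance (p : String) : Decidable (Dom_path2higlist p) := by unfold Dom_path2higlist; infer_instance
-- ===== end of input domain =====

-- B replaces A's running-accumulator loop (extending the previous output element) by a
-- comprehension that recomputes each cumulative prefix as a join of a token-prefix slice;
-- objective: simpler. Since p is always a string, A's try/except never fires: A is total.

-- ===== PORT A =====
-- l[-1] ported as pyGet? l (-1); it is only reached under the l.length ≠ 0 guard, where
-- Python's l[-1] returns exactly that last element, so the .getD [] default is never used.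
def path2higlist (p : String) : List String :=
  let spl := PySem.Chars.splitOn (PySem.Chars.strip p.toList) ['/']
  let l := spl.foldl (fun l i =>
    if l.length ≠ 0 then
      l ++ [((PySem.List.pyGet? l (-1)).getD []) ++ '/' :: i]
    else
      l ++ [i]) []
  l.map String.ofList

-- ===== PORT B =====
def path2higlist_alt (p : String) : List String :=
  let spl := PySem.Chars.splitOn (PySem.Chars.strip p.toList) ['/']
  (List.range spl.length).map (fun (i : ℕ) =>
    String.ofList (PySem.Chars.join ['/'] (PySem.List.slice spl none (some ((i : Int) + 1)))))

-- ===== PRECONDITION & SPEC =====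
def Spec_path2higlist (p : String) (out : List String) : Prop := out = path2higlist_alt p
instance (p : String) (out : List String) : Decidable (Spec_path2higlist p out) := by unfold Spec_path2higlist; infer_instance

-- ===== CLAIM (what is proved, stated in full; the proofs are below) =====
def Claim_equal_path2higlist : Prop := ∀ (p : String), Dom_path2higlist p → Spec_path2higlist p (path2higlist p)

-- ===== LEMMAS AND PROOFS =====

-- cumulative-prefix spec: pvGo acc xs lists acc ++ '/' ++ (join of each nonempty prefix of xs)
def pvGo (acc : List Char) : List (List Char) → List (List Char)
  | [] => []
  | x :: xs => (acc ++ '/' :: x) :: pvGo (acc ++ '/' :: x) xs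

theorem pvGo_map (a y : List Char) (ys : List (List Char)) :
    pvGo (a ++ '/' :: y) ys = (pvGo y ys).map (fun z => a ++ '/' :: z) := by
  induction ys generalizing y with
  | nil => simp [pvGo]
  | cons z zs ih =>
      simp only [pvGo, List.map_cons, List.append_assoc, List.cons_append]
      simpa [List.append_assoc] using ih (y ++ '/' :: z)

-- A's fold from a nonempty accumulator appends pvGo of its last element
theorem pvFoldA (xs : List (List Char)) (acc : List (List Char)) (last : List Char)
    (h : acc.getLast? = some last) :
    xs.foldl (fun l i =>
      if l.length ≠ 0 then l ++ [((PySem.List.pyGet? l (-1)).getD []) ++ '/' :: i]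
      else l ++ [i]) acc = acc ++ pvGo last xs := by
  induction xs generalizing acc last with
  | nil => simp [pvGo]
  | cons x xs ih =>
      have hne : acc ≠ [] := by rintro rfl; simp at h
      have hlen : acc.length ≠ 0 := by simpa [List.length_eq_zero_iff] using hne
      have hget : PySem.List.pyGet? acc (-1) = some last := by
        rw [PySem.List.pyGet?_neg_one]; exact h
      simp only [List.foldl_cons, if_pos hlen, hget, Option.getD_some]
      rw [ih (acc ++ [last ++ '/' :: x]) (last ++ '/' :: x) (by simp)]
      simp [pvGo, List.append_assoc]

-- B's comprehension computes the same cumulative prefixes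
theorem pvMapB (xs : List (List Char)) (x : List Char) :
    (List.range (xs.length + 1)).map
      (fun i => PySem.Chars.join ['/'] ((x :: xs).take (i + 1))) = x :: pvGo x xs := by
  induction xs generalizing x with
  | nil => simp [pvGo, PySem.Chars.join_singleton]
  | cons y ys ih =>
      rw [List.range_succ_eq_map, List.map_cons, List.map_map]
      have h1 : PySem.Chars.join ['/'] ((x :: y :: ys).take (0 + 1)) = x := by
        simp [PySem.Chars.join_singleton]
      have h2 : ((fun i => PySem.Chars.join ['/'] ((x :: y :: ys).take (i + 1))) ∘ Nat.succ) =
          fun i => x ++ '/' :: PySem.Chars.join ['/'] ((y :: ys).take (i + 1)) := by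
        funext i
        have ht : (x :: y :: ys).take (i + 1 + 1) = x :: (y :: ys).take (i + 1) := by
          simp [List.take_succ_cons]
        show PySem.Chars.join ['/'] ((x :: y :: ys).take (i + 1 + 1)) = _
        rw [ht]
        cases h3 : (y :: ys).take (i + 1) with
        | nil => simp [List.take_succ_cons] at h3
        | cons a as => rw [PySem.Chars.join_cons_cons]; simp
      rw [h1, h2]
      have h4 : (fun i => x ++ '/' :: PySem.Chars.join ['/'] ((y :: ys).take (i + 1))) =
          (fun z => x ++ '/' :: z) ∘ (fun i => PySem.Chars.join ['/'] ((y :: ys).take (i + 1))) := rfl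
      rw [h4, ← List.map_map]
      simp only [List.length_cons]
      rw [ih y]
      simp [pvGo, pvGo_map]

-- ===== VERDICT (by name: the statement is the Claim_ definition above) =====
theorem path2higlist_spec : Claim_equal_path2higlist := by
  intro p _
  unfold Spec_path2higlist path2higlist path2higlist_alt
  cases hspl : PySem.Chars.splitOn (PySem.Chars.strip p.toList) ['/'] with
  | nil => simp
  | cons x xs =>
      have hslice : ∀ i : ℕ,
          PySem.List.slice (x :: xs) none (some ((i : Int) + 1)) = (x :: xs).take (i + 1) := by
        intro i
        have : ((i : Int) + 1) = ((i + 1 : ℕ) : Int) := by push_cast; ring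
        rw [this, PySem.List.slice_to_natCast]
      have hB : (List.range (x :: xs).length).map
          (fun (i : ℕ) => PySem.Chars.join ['/'] (PySem.List.slice (x :: xs) none (some ((i : Int) + 1))))
          = x :: pvGo x xs := by
        have h4 : (List.range (x :: xs).length).map
            (fun (i : ℕ) => PySem.Chars.join ['/'] (PySem.List.slice (x :: xs) none (some ((i : Int) + 1))))
            = (List.range (xs.length + 1)).map
              (fun i => PySem.Chars.join ['/'] ((x :: xs).take (i + 1))) := by
          simp only [List.length_cons]
          exact List.map_congr_left (fun i _ => by rw [hslice i])
        rw [h4, pvMapB]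
      have hAll : (List.range (x :: xs).length).map
          (fun (i : ℕ) => String.ofList (PySem.Chars.join ['/']
            (PySem.List.slice (x :: xs) none (some ((i : Int) + 1)))))
          = (x :: pvGo x xs).map String.ofList := by
        rw [← hB, List.map_map]
        rfl
      simp only [List.foldl_cons, List.length_nil, ne_eq, not_true_eq_false, if_false,
        List.nil_append]
      rw [pvFoldA xs [x] x (by simp), hAll]
      simp
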